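-- pv_equiv track=rewrite | github.com/KingSK1998/Python-Programs | coprime.py | f
-- ===== SOURCE A (Python) =====
-- def f(n, arr):
--     n = n - 1
--     sum = 0
--     for i in range(n):
--         if (0 <= i and i <= (n-1)) and (arr[i] & arr[n] > 0):
--             sum += 0
--         else:
--             sum += arr[n] ^ arr[i]
--     return sum
-- ===== SOURCE B (Python) =====
-- def f(n, arr):
--     m = n - 1
--     if m <= 0:
--         return 0
--     last = arr[m]
--
--     def go(lo, hi):
--         # sum of contributions over index range [lo, hi) by midpoint recursion
--         if hi - lo <= 0:
--             return 0
--         if hi - lo == 1: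
--             x = arr[lo]
--             return 0 if x & last > 0 else last ^ x
--         mid = (lo + hi) // 2
--         return go(lo, mid) + go(mid, hi)
--
--     return go(0, m)
-- ===== Notes on version B (the rewrite author's own statement) =====
-- stated objective: alternative
-- what changed: B replaces A's left-to-right index loop with a running accumulator (and its always-true bounds test) by divide-and-conquer: it recursively splits the index range [0, n-1) at the midpoint and sums the two halves' XOR contributions, with a single-element base case.
import Mathlib
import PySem

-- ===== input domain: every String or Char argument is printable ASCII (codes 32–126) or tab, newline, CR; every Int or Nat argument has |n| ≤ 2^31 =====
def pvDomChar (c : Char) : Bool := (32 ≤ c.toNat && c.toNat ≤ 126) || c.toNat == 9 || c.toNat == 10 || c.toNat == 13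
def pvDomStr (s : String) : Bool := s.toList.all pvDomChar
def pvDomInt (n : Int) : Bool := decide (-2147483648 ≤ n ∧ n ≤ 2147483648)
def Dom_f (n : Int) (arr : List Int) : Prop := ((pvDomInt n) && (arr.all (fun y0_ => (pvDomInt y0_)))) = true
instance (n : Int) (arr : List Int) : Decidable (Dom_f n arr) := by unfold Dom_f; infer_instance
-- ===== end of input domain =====

-- B replaces A's left-to-right index loop (with its always-true bounds test) by divide-and-conquer
-- recursion over the index range [0, n-1), splitting at the midpoint and summing the halves.


-- ===== PORT A =====
def f (n : Int) (arr : List Int) : Int :=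
  let n1 := n - 1
  (PySem.List.pyRange 0 n1 1).foldl (fun s i =>
    if (0 ≤ i ∧ i ≤ n1 - 1) ∧ 0 < PySem.Int.band (PySem.List.pyGetD arr i 0) (PySem.List.pyGetD arr n1 0) then
      s + 0
    else
      s + PySem.Int.bxor (PySem.List.pyGetD arr n1 0) (PySem.List.pyGetD arr i 0)) 0

-- ===== PORT B =====
-- Source B's inner recursive helper go(lo, hi) (arr and last are the closed-over variables);
-- fuel = an upper bound on hi - lo makes the midpoint recursion structural (each half is strictly smaller)
def fAltGo (arr : List Int) (last : Int) : Nat → Int → Int → Int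
  | 0, _, _ => 0
  | fuel + 1, lo, hi =>
    if hi - lo ≤ 0 then 0
    else if hi - lo = 1 then
      let x := PySem.List.pyGetD arr lo 0
      if 0 < PySem.Int.band x last then 0 else PySem.Int.bxor last x
    else
      let mid := PySem.Int.floordiv (lo + hi) 2
      fAltGo arr last fuel lo mid + fAltGo arr last fuel mid hi

def f_alt (n : Int) (arr : List Int) : Int :=
  let m := n - 1
  if m ≤ 0 then 0
  else
    let last := PySem.List.pyGetD arr m 0
    fAltGo arr last m.toNat 0 m

-- ===== PRECONDITION & SPEC =====
-- Pre_f is exactly where A returns: for n ≥ 2 the loop reads arr[n-1], an IndexError unless n-1 < len(arr).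
def Pre_f (n : Int) (arr : List Int) : Prop := n ≤ 1 ∨ n - 1 < (arr.length : Int)
instance (n : Int) (arr : List Int) : Decidable (Pre_f n arr) := by unfold Pre_f; infer_instance
def pvWitness_f : Int × List Int := (4, [1, 2, 3, 4])
def Spec_f (n : Int) (arr : List Int) (out : Int) : Prop := out = f_alt n arr
instance (n : Int) (arr : List Int) (out : Int) : Decidable (Spec_f n arr out) := by unfold Spec_f; infer_instance

-- ===== CLAIM (what is proved, stated in full; the proofs are below) =====
def Claim_equal_f : Prop := ∀ (n : Int) (arr : List Int), Dom_f n arr → Pre_f n arr → Spec_f n arr (f n arr)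

-- ===== LEMMAS AND PROOFS =====

-- A's per-element contribution (last = the pivot element arr[n-1])
def contrib (arr : List Int) (last : Int) (i : Int) : Int :=
  if 0 < PySem.Int.band (PySem.List.pyGetD arr i 0) last then 0
  else PySem.Int.bxor last (PySem.List.pyGetD arr i 0)

-- B's recursion computes the sum of contributions over the index range [lo, hi)
theorem fAltGo_eq_sum (arr : List Int) (last : Int) :
    ∀ (fuel : Nat) (lo hi : Int), (hi - lo).toNat ≤ fuel →
    fAltGo arr last fuel lo hi = ((PySem.List.pyRange lo hi 1).map (contrib arr last)).sum := by
  intro fuel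
  induction fuel with
  | zero =>
    intro lo hi hk
    rw [fAltGo, PySem.List.pyRange_one_eq_nil (by omega)]; simp
  | succ fuel ih =>
    intro lo hi hk
    rw [fAltGo]
    by_cases h0 : hi - lo ≤ 0
    · rw [if_pos h0, PySem.List.pyRange_one_eq_nil (by omega)]; simp
    · rw [if_neg h0]
      by_cases h1 : hi - lo = 1
      · rw [if_pos h1]
        have : hi = lo + 1 := by omega
        rw [this, PySem.List.pyRange_one_singleton]
        simp [contrib]
      · rw [if_neg h1]
        set mid := PySem.Int.floordiv (lo + hi) 2 with hmid
        have hb := (PySem.Int.floordiv_eq_iff_of_pos (a := lo + hi) (b := 2) (q := mid) (by omega)).1 rfl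
        have hlo : lo < mid := by omega
        have hhi : mid < hi := by omega
        show fAltGo arr last fuel lo mid + fAltGo arr last fuel mid hi = _
        rw [ih lo mid (by omega), ih mid hi (by omega),
            PySem.List.pyRange_one_append lo mid hi (by omega) (by omega)]
        simp

-- ===== VERDICT (by name: the statement is the Claim_ definition above) =====
theorem f_spec : Claim_equal_f := by
  intro n arr _ hpre
  unfold Spec_f f f_alt
  set m := n - 1 with hm
  by_cases hm0 : m ≤ 0
  · simp [PySem.List.pyRange_one_eq_nil (by omega : m ≤ 0), hm0]
  · simp only [if_neg hm0]
    set last := PySem.List.pyGetD arr m 0 with hlast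
    rw [fAltGo_eq_sum arr last m.toNat 0 m (by omega)]
    rw [PySem.List.foldl_congr_mem (g := fun s i => s + contrib arr last i)]
    · rw [PySem.List.foldl_add]
      simp
    · intro acc i hi
      rw [PySem.List.mem_pyRange_one] at hi
      unfold contrib
      by_cases hc : 0 < PySem.Int.band (PySem.List.pyGetD arr i 0) last
      · rw [if_pos ⟨⟨hi.1, by omega⟩, hc⟩, if_pos hc]
      · rw [if_neg (by tauto), if_neg hc]
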